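-- pv_equiv track=rewrite | github.com/mgh3326/auto_trader | scripts/paperclip_cli_probe.py | _child_issues_by_parent
-- ===== SOURCE A (Python) =====
-- from typing import Any
--
-- def _child_issues_by_parent(
--     snapshot: dict[str, Any],
-- ) -> dict[str, list[dict[str, Any]]]:
--     grouped: dict[str, list[dict[str, Any]]] = {}
--     for row in snapshot.get("issues", []):
--         if not isinstance(row, dict):
--             continue
--         parent_id = row.get("parentId")
--         if not isinstance(parent_id, str) or not parent_id:
--             continue
--         grouped.setdefault(parent_id, []).append(row)
--     return grouped
-- ===== SOURCE B (Python) =====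
-- def _child_issues_by_parent(snapshot):
--     rows = [
--         row
--         for row in snapshot.get("issues", [])
--         if isinstance(row, dict)
--         and isinstance(row.get("parentId"), str)
--         and row.get("parentId")
--     ]
--     keys = dict.fromkeys(row["parentId"] for row in rows)
--     return {k: [row for row in rows if row["parentId"] == k] for k in keys}
-- ===== Notes on version B (the rewrite author's own statement) =====
-- stated objective: alternative
-- what changed: Replaces the single accumulating setdefault/append pass with a filter-once, dedup-keys, then per-key-filter pipeline (one list comprehension per group instead of a mutable dict built row by row).
import Mathlib
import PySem

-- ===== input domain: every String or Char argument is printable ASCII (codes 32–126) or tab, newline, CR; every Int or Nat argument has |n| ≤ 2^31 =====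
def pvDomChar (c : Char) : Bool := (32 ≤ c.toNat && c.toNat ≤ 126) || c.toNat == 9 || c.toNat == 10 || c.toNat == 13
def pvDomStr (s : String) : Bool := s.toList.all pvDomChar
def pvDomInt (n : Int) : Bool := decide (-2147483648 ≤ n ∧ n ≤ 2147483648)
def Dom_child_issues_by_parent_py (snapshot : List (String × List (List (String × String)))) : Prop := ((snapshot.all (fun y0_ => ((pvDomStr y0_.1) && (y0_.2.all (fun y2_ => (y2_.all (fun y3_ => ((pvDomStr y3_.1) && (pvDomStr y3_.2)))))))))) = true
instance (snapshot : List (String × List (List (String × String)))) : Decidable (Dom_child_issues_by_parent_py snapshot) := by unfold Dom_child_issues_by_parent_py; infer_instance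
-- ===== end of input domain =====

-- B replaces A's single setdefault/append accumulation pass with a filter-once,
-- dedup-keys, per-key-filter pipeline; same return value, objective: alternative.


-- shared primitive: Python's dict.get on an association list (first match)
def pvGet {α : Type} (d : List (String × α)) (k : String) : Option α :=
  (d.find? (fun p => p.1 == k)).map (·.2)

-- ===== PORT A =====
def child_issues_by_parent_py (snapshot : List (String × List (List (String × String)))) : List (String × List (List (String × String))) :=
  let issues : List (List (String × String)) := (pvGet snapshot "issues").getD []
  let grouped : PySem.Dict String (List (List (String × String))) :=
    issues.foldl (fun grouped row =>
      -- isinstance(row, dict) is always true at this type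
      match pvGet row "parentId" with
      | none => grouped
      | some parentId =>
        if parentId = "" then grouped
        -- grouped.setdefault(parent_id, []).append(row)
        else grouped.modify parentId [] (· ++ [row])) PySem.Dict.empty
  grouped.items

-- ===== PORT B =====
def child_issues_by_parent_py_alt (snapshot : List (String × List (List (String × String)))) : List (String × List (List (String × String))) :=
  let rows : List (List (String × String)) :=
    ((pvGet snapshot "issues").getD []).filter (fun row =>
      match pvGet row "parentId" with
      | some p => p ≠ ""
      | none => false)
  let keys : List String := PySem.List.dedup (rows.map (fun row => (pvGet row "parentId").getD ""))
  keys.map (fun k => (k, rows.filter (fun row => (pvGet row "parentId").getD "" == k)))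

-- ===== PRECONDITION & SPEC =====
def Spec_child_issues_by_parent_py (snapshot : List (String × List (List (String × String)))) (out : List (String × List (List (String × String)))) : Prop := out = child_issues_by_parent_py_alt snapshot
instance (snapshot : List (String × List (List (String × String)))) (out : List (String × List (List (String × String)))) : Decidable (Spec_child_issues_by_parent_py snapshot out) := by unfold Spec_child_issues_by_parent_py; infer_instance

-- ===== CLAIM (what is proved, stated in full; the proofs are below) =====
def Claim_equal_child_issues_by_parent_py : Prop := ∀ (snapshot : List (String × List (List (String × String)))), Dom_child_issues_by_parent_py snapshot → Spec_child_issues_by_parent_py snapshot (child_issues_by_parent_py snapshot)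

-- ===== LEMMAS AND PROOFS =====

-- the filter predicate of B and the group key of a row
def pvPass (row : List (String × String)) : Bool :=
  match pvGet row "parentId" with
  | some p => p ≠ ""
  | none => false

def pvKey (row : List (String × String)) : String := (pvGet row "parentId").getD ""

-- A's conditional accumulation over all rows is the unconditional modify-fold over the passing rows
theorem pvFoldA_eq_filter (issues : List (List (String × String)))
    (d : PySem.Dict String (List (List (String × String)))) :
    issues.foldl (fun grouped row =>
      match pvGet row "parentId" with
      | none => grouped
      | some parentId =>
        if parentId = "" then grouped
        else grouped.modify parentId [] (· ++ [row])) d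
    = (issues.filter pvPass).foldl
        (fun grouped row => grouped.modify (pvKey row) [] (· ++ [row])) d := by
  induction issues generalizing d with
  | nil => rfl
  | cons r rs ih =>
    simp only [List.foldl_cons, List.filter_cons]
    cases h : pvGet r "parentId" with
    | none => simp [pvPass, h, ih]
    | some p =>
      by_cases hp : p = "" <;>
        simp [pvPass, pvKey, h, hp, ih, List.foldl_cons]

theorem child_issues_spec_aux (snapshot : List (String × List (List (String × String)))) :
    child_issues_by_parent_py snapshot = child_issues_by_parent_py_alt snapshot := by
  unfold child_issues_by_parent_py child_issues_by_parent_py_alt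
  dsimp only
  set issues := (pvGet snapshot "issues").getD [] with hissues
  rw [pvFoldA_eq_filter]
  set rows := issues.filter pvPass with hrows
  have hfb : (fun row => match pvGet row "parentId" with
      | some p => decide (p ≠ "")
      | none => false) = pvPass := by
    funext r; simp [pvPass]
  rw [hfb]
  -- rewrite the modify-fold as a fold over (key, row) pairs
  rw [← List.foldl_map (f := fun r => (pvKey r, r))
    (g := fun (grouped : PySem.Dict String (List (List (String × String)))) p =>
      grouped.modify p.1 [] (· ++ [p.2])) (l := rows) (init := PySem.Dict.empty)]
  set d := (rows.map (fun r => (pvKey r, r))).foldl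
      (fun (grouped : PySem.Dict String (List (List (String × String)))) p =>
        grouped.modify p.1 [] (· ++ [p.2])) PySem.Dict.empty with hd
  have hnd : d.keys.Nodup := by
    rw [hd]
    exact PySem.Dict.nodup_keys_foldl_modify_key _ Prod.fst [] (fun _ p => (· ++ [p.2])) _
      PySem.Dict.nodup_keys_empty
  have hkeys : d.keys = PySem.List.dedup (rows.map pvKey) := by
    rw [hd, PySem.Dict.keys_foldl_modify_key, PySem.Dict.keys_empty,
      PySem.Set.update_nil_left, PySem.List.dedup_eq_ofList, List.map_map]
    rfl
  have hget : ∀ k, d.getD k [] = rows.filter (fun r => pvKey r == k) := by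
    intro k
    rw [hd, PySem.Dict.getD_foldl_modify_append, PySem.Dict.getD_empty]
    rw [List.filter_map, List.map_map]
    simp [Function.comp_def]
  rw [PySem.Dict.items_eq_map_keys d hnd [], hkeys]
  have hkf : (fun row => (pvGet row "parentId").getD "") = pvKey := by
    funext r; rfl
  rw [hkf]
  refine List.map_congr_left ?_
  intro k _
  rw [hget k]
  rfl

-- ===== VERDICT (by name: the statement is the Claim_ definition above) =====
theorem child_issues_by_parent_py_spec : Claim_equal_child_issues_by_parent_py := by
  intro snapshot _
  unfold Spec_child_issues_by_parent_py
  exact child_issues_spec_aux snapshot
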